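-- pv_equiv track=rewrite | github.com/blanu/AdversaryLab-offline | stats-incremental.py | packetsPerSecond
-- ===== SOURCE A (Python) =====
-- def packetsPerSecond(offsets):
--   current=0
--   count=0
--   for offset in offsets:
--     if offset==current:
--       count=count+1
--     else:
--       yield count
--       for step in range(offset-(current+1)):
--         yield 0
--       count=1
--     current=offset
-- ===== SOURCE B (Python) =====
-- def packetsPerSecond(offsets):
--     # phase 1: run-length table of consecutive equal offsets
--     groups = []
--     i = 0
--     n = len(offsets)
--     while i < n:
--         v = offsets[i]
--         j = i + 1
--         while j < n and offsets[j] == v: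
--             j += 1
--         groups.append((v, j - i))
--         i = j
--     # virtual starting run when the first offset is nonzero
--     if groups and groups[0][0] != 0:
--         groups = [(0, 0)] + groups
--     # phase 2: emit per adjacent pair; the last run has no successor and is dropped
--     for (pv, pc), (cv, _cc) in zip(groups, groups[1:]):
--         yield pc
--         for _ in range(cv - (pv + 1)):
--             yield 0
-- ===== Notes on version B (the rewrite author's own statement) =====
-- stated objective: alternative
-- what changed: Replaces A's one-pass state machine (current/count mutated per element) by a two-phase decomposition: first build a run-length table of consecutive equal offsets (prepending a virtual (0,0) run when the first offset is nonzero), then emit per adjacent run pair the previous run's length followed by the gap zeros; the final run is naturally never emitted because it has no successor.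
import Mathlib
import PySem

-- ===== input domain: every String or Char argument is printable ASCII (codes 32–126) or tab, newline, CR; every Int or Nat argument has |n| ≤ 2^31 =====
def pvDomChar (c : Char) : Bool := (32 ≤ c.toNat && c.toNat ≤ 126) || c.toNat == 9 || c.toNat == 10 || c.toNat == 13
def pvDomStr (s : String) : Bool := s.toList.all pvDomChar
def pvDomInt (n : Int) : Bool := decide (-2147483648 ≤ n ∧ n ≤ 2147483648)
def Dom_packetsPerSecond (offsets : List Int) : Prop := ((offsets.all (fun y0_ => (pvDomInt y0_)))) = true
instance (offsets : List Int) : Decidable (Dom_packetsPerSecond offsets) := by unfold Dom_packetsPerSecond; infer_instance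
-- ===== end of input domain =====

-- B replaces A's one-pass current/count state machine by a run-length table plus an
-- adjacent-pair emission phase (alternative decomposition, same cost).

-- ===== PORT A =====
-- A is a generator; the port returns the list of yielded values, accumulated by the
-- same loop over the same (current, count) state.
def packetsPerSecond (offsets : List Int) : List Int :=
  (offsets.foldl
    (fun (s : Int × Int × List Int) (offset : Int) =>
      let current := s.1
      let count := s.2.1
      let out := s.2.2
      if offset = current then
        (offset, count + 1, out)
      else
        -- 'yield count' then 'for step in range(offset-(current+1)): yield 0'
        (offset, 1, out ++ count :: List.replicate (offset - (current + 1)).toNat 0))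
    (0, 0, [])).2.2

-- ===== PORT B =====
-- Source B phase 1: each step of the outer loop scans one run of consecutive equal values
-- and moves past it; takeWhile/dropWhile are that inner scan.
def pvRuns : List Int → List (Int × Int)
  | [] => []
  | v :: rest =>
      let same := rest.takeWhile (· = v)
      let rest' := rest.dropWhile (· = v)
      (v, 1 + (same.length : Int)) :: pvRuns rest'
termination_by xs => xs.length
decreasing_by
  simp only [List.length_cons]
  exact Nat.lt_succ_of_le (List.length_dropWhile_le _ _)

def packetsPerSecond_alt (offsets : List Int) : List Int :=
  let groups := pvRuns offsets
  let groups :=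
    match groups with
    | [] => []
    | (v, c) :: gs => if v ≠ 0 then (0, 0) :: (v, c) :: gs else (v, c) :: gs
  (groups.zip groups.tail).flatMap
    (fun pr => pr.1.2 :: List.replicate (pr.2.1 - (pr.1.1 + 1)).toNat 0)

-- ===== PRECONDITION & SPEC =====
def Spec_packetsPerSecond (offsets : List Int) (out : List Int) : Prop := out = packetsPerSecond_alt offsets
instance (offsets : List Int) (out : List Int) : Decidable (Spec_packetsPerSecond offsets out) := by unfold Spec_packetsPerSecond; infer_instance

-- ===== CLAIM (what is proved, stated in full; the proofs are below) =====
def Claim_equal_packetsPerSecond : Prop := ∀ (offsets : List Int), Dom_packetsPerSecond offsets → Spec_packetsPerSecond offsets (packetsPerSecond offsets)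

-- ===== LEMMAS AND PROOFS =====

-- What A's loop emits from state (current, count), defined recursively.
def emitA (current count : Int) : List Int → List Int
  | [] => []
  | o :: rest =>
      if o = current then emitA current (count + 1) rest
      else (count :: List.replicate (o - (current + 1)).toNat 0) ++ emitA o 1 rest

theorem foldA_emitA (xs : List Int) : ∀ (current count : Int) (out : List Int),
    ((xs.foldl
      (fun (s : Int × Int × List Int) (offset : Int) =>
        let current := s.1
        let count := s.2.1
        let out := s.2.2
        if offset = current then
          (offset, count + 1, out)
        else
          (offset, 1, out ++ count :: List.replicate (offset - (current + 1)).toNat 0))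
      (current, count, out)).2.2) = out ++ emitA current count xs := by
  induction xs with
  | nil => intro c k o; simp [emitA]
  | cons x xs ih =>
      intro c k o
      by_cases h : x = c
      · subst h; simp [List.foldl_cons, emitA, ih]
      · simp [List.foldl_cons, emitA, h, ih]

-- What B's pair phase emits from a previous run and the remaining runs.
def emitB (prev : Int × Int) : List (Int × Int) → List Int
  | [] => []
  | g :: gs => prev.2 :: List.replicate (g.1 - (prev.1 + 1)).toNat 0 ++ emitB g gs

theorem zip_flatMap_emitB (gs : List (Int × Int)) : ∀ (g : Int × Int),
    (((g :: gs).zip gs).flatMap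
      (fun pr => pr.1.2 :: List.replicate (pr.2.1 - (pr.1.1 + 1)).toNat 0)) = emitB g gs := by
  induction gs with
  | nil => intro g; simp [emitB]
  | cons h t ih =>
      intro g
      rw [List.zip_cons_cons, List.flatMap_cons, ih h]
      simp [emitB]

theorem emitA_absorb : ∀ (same : List Int) (v c : Int) (rest : List Int),
    (∀ x ∈ same, x = v) → emitA v c (same ++ rest) = emitA v (c + (same.length : Int)) rest
  | [], v, c, rest, _ => by simp
  | x :: xs, v, c, rest, h => by
      have hx : x = v := h x List.mem_cons_self
      subst hx
      have h' := fun y hy => h y (List.mem_cons_of_mem _ hy)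
      calc emitA x c ((x :: xs) ++ rest)
          = emitA x (c + 1) (xs ++ rest) := by simp [emitA]
        _ = emitA x (c + 1 + (xs.length : Int)) rest := emitA_absorb xs x (c + 1) rest h'
        _ = emitA x (c + ((x :: xs).length : Int)) rest := by
              have hc : c + 1 + (xs.length : Int) = c + ((x :: xs).length : Int) := by
                simp only [List.length_cons]; push_cast; ring
              rw [hc]

theorem head_dropWhile_ne (v : Int) : ∀ (xs : List Int),
    ∀ y ∈ (xs.dropWhile (· = v)).head?, ¬ (y = v)
  | [] => by simp
  | x :: xs => by
      by_cases h : x = v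
      · simpa [List.dropWhile_cons, h] using head_dropWhile_ne v xs
      · intro y hy
        simp [h] at hy
        subst hy; exact h

theorem pvRuns_cons (v : Int) (rest : List Int) :
    pvRuns (v :: rest) = (v, 1 + ((rest.takeWhile (· = v)).length : Int)) ::
      pvRuns (rest.dropWhile (· = v)) := by
  rw [pvRuns]

-- main: if the head of xs differs from current, A's emission equals B's pair emission
-- over the run table of xs.
theorem emitA_eq_emitB_bounded (n : Nat) : ∀ (xs : List Int), xs.length ≤ n →
    ∀ (current count : Int), (∀ y ∈ xs.head?, ¬ (y = current)) →
    emitA current count xs = emitB (current, count) (pvRuns xs) := by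
  induction n with
  | zero =>
      intro xs hlen _ _ _
      have : xs = [] := List.length_eq_zero_iff.mp (Nat.le_zero.mp hlen)
      subst this
      simp [emitA, pvRuns, emitB]
  | succ n ih =>
      intro xs hlen c k hne
      match xs with
      | [] => simp [emitA, pvRuns, emitB]
      | v :: rest =>
          have hvc : ¬ (v = c) := hne v (by simp)
          rw [pvRuns_cons]
          simp only [emitA, if_neg hvc, emitB]
          congr 1
          have hsr : rest.takeWhile (· = v) ++ rest.dropWhile (· = v) = rest :=
            List.takeWhile_append_dropWhile
          have habs : emitA v 1 rest
              = emitA v (1 + ((rest.takeWhile (· = v)).length : Int)) (rest.dropWhile (· = v)) := by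
            conv_lhs => rw [← hsr]
            exact emitA_absorb _ v 1 _ (fun x hx =>
              of_decide_eq_true (List.mem_takeWhile_imp (p := fun x => decide (x = v)) hx))
          rw [habs]
          exact ih (rest.dropWhile (· = v))
            (le_trans (List.length_dropWhile_le _ _) (Nat.lt_succ_iff.mp (by simpa using hlen)))
            v (1 + ((rest.takeWhile (· = v)).length : Int))
            (head_dropWhile_ne v rest)

theorem emitA_eq_emitB (xs : List Int) (current count : Int)
    (h : ∀ y ∈ xs.head?, ¬ (y = current)) :
    emitA current count xs = emitB (current, count) (pvRuns xs) :=
  emitA_eq_emitB_bounded xs.length xs le_rfl current count h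

-- ===== VERDICT (by name: the statement is the Claim_ definition above) =====
theorem packetsPerSecond_spec : Claim_equal_packetsPerSecond := by
  intro offsets _
  unfold Spec_packetsPerSecond packetsPerSecond packetsPerSecond_alt
  rw [foldA_emitA]
  simp only [List.nil_append]
  cases offsets with
  | nil => simp [emitA, pvRuns]
  | cons v rest =>
      rw [pvRuns_cons]
      by_cases hv : v = 0
      · subst hv
        simp only [ne_eq, not_true_eq_false, if_false, List.tail_cons]
        rw [zip_flatMap_emitB]
        have h1 : emitA 0 0 (0 :: rest) = emitA 0 1 rest := by simp [emitA]
        have hsr : rest.takeWhile (· = (0:Int)) ++ rest.dropWhile (· = (0:Int)) = rest :=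
          List.takeWhile_append_dropWhile
        have habs : emitA 0 1 rest
            = emitA 0 (1 + ((rest.takeWhile (· = (0:Int))).length : Int))
                (rest.dropWhile (· = (0:Int))) := by
          conv_lhs => rw [← hsr]
          exact emitA_absorb _ 0 1 _ (fun x hx =>
            of_decide_eq_true (List.mem_takeWhile_imp (p := fun x => decide (x = (0:Int))) hx))
        rw [h1, habs]
        exact emitA_eq_emitB _ _ _ (head_dropWhile_ne 0 rest)
      · simp only [ne_eq, hv, not_false_eq_true, if_true, List.tail_cons]
        rw [zip_flatMap_emitB]
        rw [← pvRuns_cons]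
        exact emitA_eq_emitB (v :: rest) 0 0 (by intro y hy; simp at hy; subst hy; exact hv)
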